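-- pv_equiv track=rewrite | github.com/alexbatesdev/SchoolDocs | Q7 - Spring/Data Structures and Algorithms/Sprint 2/kata.py | count_specMultMath
-- ===== SOURCE A (Python) =====
-- def count_specMultMath(n, max_val):
--     primesList = [
--         2,
--         3,
--         5,
--         7,
--         11,
--         13,
--         17,
--         19,
--         23,
--         29,
--         31,
--         37,
--         41,
--         43,
--         47,
--         53,
--         59,
--         61,
--         67,
--         71,
--     ]
--     num = 1
--     for i in range(n):
--         num *= primesList[i]
--     return max_val // num
-- ===== SOURCE B (Python) =====
-- # B: table lookup of precomputed primorials instead of the multiplication loop.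
-- _PRIMORIALS = [
--     1, 2, 6, 30, 210, 2310, 30030, 510510, 9699690, 223092870,
--     6469693230, 200560490130, 7420738134810, 304250263527210,
--     13082761331670030, 614889782588491410, 32589158477190044730,
--     1922760350154212639070, 117288381359406970983270,
--     7858321551080267055879090, 557940830126698960967415390,
-- ]  # 21 entries: index k = product of first k primes
--
--
-- def count_specMultMath(n, max_val):
--     divisor = 1 if n <= 0 else _PRIMORIALS[n]
--     return max_val // divisor
-- ===== Notes on version B (the rewrite author's own statement) =====
-- stated objective: simpler
-- what changed: Replaces the per-call multiplication loop over a prime list with a single lookup in a precomputed 21-entry primorial table (n <= 0 uses divisor 1, matching A's empty loop).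
import Mathlib
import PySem

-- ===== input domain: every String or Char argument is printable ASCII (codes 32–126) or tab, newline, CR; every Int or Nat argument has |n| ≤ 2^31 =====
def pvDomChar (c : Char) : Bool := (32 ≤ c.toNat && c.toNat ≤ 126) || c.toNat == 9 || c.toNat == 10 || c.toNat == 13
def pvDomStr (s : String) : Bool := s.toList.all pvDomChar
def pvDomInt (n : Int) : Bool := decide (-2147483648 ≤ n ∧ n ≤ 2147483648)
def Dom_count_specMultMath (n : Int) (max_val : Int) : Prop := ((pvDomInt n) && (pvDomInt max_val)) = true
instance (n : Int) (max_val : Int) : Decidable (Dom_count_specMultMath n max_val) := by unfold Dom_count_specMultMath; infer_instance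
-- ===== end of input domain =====

-- B replaces A's multiplication loop over the prime list with one lookup in a
-- precomputed primorial table (n <= 0 -> divisor 1, like A's empty loop); simpler.


-- ===== PORT A =====
def pvPrimesList : List Int :=
  [2, 3, 5, 7, 11, 13, 17, 19, 23, 29, 31, 37, 41, 43, 47, 53, 59, 61, 67, 71]

-- A's loop: num *= primesList[i] for i in range(n).  pyGetD's default is never
-- used inside Pre_ (n ≤ 20); for n ≥ 21 Python raises IndexError (excluded by Pre_).
def pvLoopA (n : Int) : Int :=
  (PySem.List.pyRange 0 n 1).foldl (fun num i => num * PySem.List.pyGetD pvPrimesList i 1) 1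

def count_specMultMath (n : Int) (max_val : Int) : Int :=
  PySem.Int.floordiv max_val (pvLoopA n)

-- ===== PORT B =====
def pvPrimorials : List Int :=
  [1, 2, 6, 30, 210, 2310, 30030, 510510, 9699690, 223092870,
   6469693230, 200560490130, 7420738134810, 304250263527210,
   13082761331670030, 614889782588491410, 32589158477190044730,
   1922760350154212639070, 117288381359406970983270,
   7858321551080267055879090, 557940830126698960967415390]

-- divisor = 1 if n <= 0 else _PRIMORIALS[n]; the pyGetD default is never used
-- inside Pre_ (n ≤ 20); for n ≥ 21 Python raises IndexError (excluded by Pre_).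
def count_specMultMath_alt (n : Int) (max_val : Int) : Int :=
  PySem.Int.floordiv max_val (if n ≤ 0 then 1 else PySem.List.pyGetD pvPrimorials n 1)

-- ===== PRECONDITION & SPEC =====
-- Pre_ excludes exactly n ≥ 21, where both Pythons raise IndexError.
def Pre_count_specMultMath (n : Int) (max_val : Int) : Prop := n ≤ 20
instance (n : Int) (max_val : Int) : Decidable (Pre_count_specMultMath n max_val) := by
  unfold Pre_count_specMultMath; infer_instance

def pvWitness_count_specMultMath : Int × Int := (3, 100)

def Spec_count_specMultMath (n : Int) (max_val : Int) (out : Int) : Prop :=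
  out = count_specMultMath_alt n max_val
instance (n : Int) (max_val : Int) (out : Int) : Decidable (Spec_count_specMultMath n max_val out) := by
  unfold Spec_count_specMultMath; infer_instance

-- ===== CLAIM (what is proved, stated in full; the proofs are below) =====
def Claim_equal_count_specMultMath : Prop :=
  ∀ (n : Int) (max_val : Int), Dom_count_specMultMath n max_val →
    Pre_count_specMultMath n max_val →
    Spec_count_specMultMath n max_val (count_specMultMath n max_val)

-- ===== LEMMAS AND PROOFS =====
theorem pvDiv_eq (n : Int) (h : n ≤ 20) :
    pvLoopA n = (if n ≤ 0 then 1 else PySem.List.pyGetD pvPrimorials n 1) := by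
  by_cases h0 : n ≤ 0
  · simp [pvLoopA, PySem.List.pyRange_one_eq_nil h0, h0]
  · have h1 : 1 ≤ n := by omega
    interval_cases n <;> decide

-- ===== VERDICT (by name: the statement is the Claim_ definition above) =====
theorem count_specMultMath_spec : Claim_equal_count_specMultMath := by
  intro n max_val _ hpre
  unfold Spec_count_specMultMath count_specMultMath count_specMultMath_alt
  rw [pvDiv_eq n hpre]
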